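-- pv_equiv track=rewrite | github.com/DK-G/PicsPickPrompt | img2prompt/utils/text_filters.py | adjust_framing_for_cues
-- ===== SOURCE A (Python) =====
-- UPPER_BODY_CUES = {
--     "upper body",
--     "bust shot",
--     "head-and-shoulders framing",
--     "portrait",
--     "three-quarter view",
-- }
--
-- def adjust_framing_for_cues(tokens: list[str]) -> list[str]:
--     s = {t.lower().strip() for t in tokens}
--     if s & UPPER_BODY_CUES and "loose framing" in s:
--         return [
--             "tight framing" if t.lower().strip() == "loose framing" else t
--             for t in tokens
--         ]
--     return tokens
-- ===== SOURCE B (Python) =====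
-- UPPER_BODY_CUES = {
--     "upper body",
--     "bust shot",
--     "head-and-shoulders framing",
--     "portrait",
--     "three-quarter view",
-- }
--
-- def adjust_framing_for_cues(tokens: list[str]) -> list[str]:
--     has_cue = False
--     has_loose = False
--     candidate = []
--     for t in tokens:
--         n = t.lower().strip()
--         if n in UPPER_BODY_CUES:
--             has_cue = True
--         if n == "loose framing":
--             has_loose = True
--             candidate.append("tight framing")
--         else:
--             candidate.append(t)
--     return candidate if has_cue and has_loose else tokens
-- ===== Notes on version B (the rewrite author's own statement) =====
-- stated objective: simpler
-- what changed: Fuses A's set-building detection pass and the separate rewrite comprehension into one loop that normalizes each token once, sets the two flags and builds the rewritten list simultaneously; no intermediate set is constructed.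
import Mathlib
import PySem

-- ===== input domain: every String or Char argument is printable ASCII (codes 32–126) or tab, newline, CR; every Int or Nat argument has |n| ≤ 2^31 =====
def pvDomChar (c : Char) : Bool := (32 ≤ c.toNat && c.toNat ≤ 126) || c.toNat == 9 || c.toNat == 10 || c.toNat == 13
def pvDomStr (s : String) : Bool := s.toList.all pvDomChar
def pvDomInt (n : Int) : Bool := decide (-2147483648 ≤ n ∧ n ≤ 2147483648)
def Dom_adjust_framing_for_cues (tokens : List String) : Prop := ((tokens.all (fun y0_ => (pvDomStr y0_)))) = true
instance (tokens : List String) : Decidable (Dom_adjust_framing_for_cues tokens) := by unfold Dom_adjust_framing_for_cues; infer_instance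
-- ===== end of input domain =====

-- B fuses A's two passes (set-building detection + rewrite comprehension) into one
-- loop that normalizes each token once, sets two flags and builds the candidate list.

-- ===== PORT A =====
def pvCuesA : PySem.Set String :=
  PySem.Set.ofList ["upper body", "bust shot", "head-and-shoulders framing",
                    "portrait", "three-quarter view"]

def adjust_framing_for_cues (tokens : List String) : List String :=
  let s : PySem.Set String :=
    PySem.Set.ofList (tokens.map (fun t => PySem.Str.strip (PySem.Str.lower t)))
  if PySem.Set.inter s pvCuesA ≠ [] ∧ PySem.Set.contains s "loose framing" = true then
    tokens.map (fun t =>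
      if PySem.Str.strip (PySem.Str.lower t) = "loose framing" then "tight framing" else t)
  else tokens

-- ===== PORT B =====
def pvCuesB : List String :=
  ["upper body", "bust shot", "head-and-shoulders framing",
   "portrait", "three-quarter view"]

def pvStepB (acc : Bool × Bool × List String) (t : String) : Bool × Bool × List String :=
  let n := PySem.Str.strip (PySem.Str.lower t)
  (acc.1 || pvCuesB.contains n,
   acc.2.1 || (n == "loose framing"),
   acc.2.2 ++ [if n == "loose framing" then "tight framing" else t])

def adjust_framing_for_cues_alt (tokens : List String) : List String :=
  let st := tokens.foldl pvStepB (false, false, [])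
  if st.1 && st.2.1 then st.2.2 else tokens

-- ===== PRECONDITION & SPEC =====
def Spec_adjust_framing_for_cues (tokens : List String) (out : List String) : Prop := out = adjust_framing_for_cues_alt tokens
instance (tokens : List String) (out : List String) : Decidable (Spec_adjust_framing_for_cues tokens out) := by unfold Spec_adjust_framing_for_cues; infer_instance

-- ===== CLAIM (what is proved, stated in full; the proofs are below) =====
def Claim_equal_adjust_framing_for_cues : Prop := ∀ (tokens : List String), Dom_adjust_framing_for_cues tokens → Spec_adjust_framing_for_cues tokens (adjust_framing_for_cues tokens)

-- ===== LEMMAS AND PROOFS =====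

theorem pvFold_char (tokens : List String) (acc : Bool × Bool × List String) :
    tokens.foldl pvStepB acc =
      (acc.1 || tokens.any (fun t => pvCuesB.contains (PySem.Str.strip (PySem.Str.lower t))),
       acc.2.1 || tokens.any (fun t => PySem.Str.strip (PySem.Str.lower t) == "loose framing"),
       acc.2.2 ++ tokens.map (fun t =>
         if PySem.Str.strip (PySem.Str.lower t) = "loose framing" then "tight framing" else t)) := by
  induction tokens generalizing acc with
  | nil => simp
  | cons h tl ih =>
    simp only [List.foldl_cons, ih, pvStepB, List.any_cons, List.map_cons]
    refine Prod.ext ?_ (Prod.ext ?_ ?_) <;> simp [Bool.or_assoc, beq_iff_eq]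

theorem pvCondA_iff (tokens : List String) :
    (PySem.Set.inter
        (PySem.Set.ofList (tokens.map (fun t => PySem.Str.strip (PySem.Str.lower t)))) pvCuesA ≠ []
      ∧ PySem.Set.contains
        (PySem.Set.ofList (tokens.map (fun t => PySem.Str.strip (PySem.Str.lower t)))) "loose framing" = true)
      ↔ ((tokens.any (fun t => pvCuesB.contains (PySem.Str.strip (PySem.Str.lower t))) = true)
      ∧ (tokens.any (fun t => PySem.Str.strip (PySem.Str.lower t) == "loose framing") = true)) := by
  constructor
  · rintro ⟨h1, h2⟩
    constructor
    · rcases List.exists_mem_of_ne_nil _ h1 with ⟨x, hx⟩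
      rw [PySem.Set.mem_inter] at hx
      rcases hx with ⟨hxs, hxc⟩
      rw [PySem.Set.mem_ofList, List.mem_map] at hxs
      rcases hxs with ⟨t, ht, rfl⟩
      simp only [List.any_eq_true]
      refine ⟨t, ht, ?_⟩
      simp only [pvCuesA, PySem.Set.mem_ofList] at hxc
      simpa [pvCuesB] using hxc
    · rw [PySem.Set.contains_iff, PySem.Set.mem_ofList, List.mem_map] at h2
      rcases h2 with ⟨t, ht, hn⟩
      simp only [List.any_eq_true]
      exact ⟨t, ht, by simp [hn]⟩
  · rintro ⟨h1, h2⟩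
    simp only [List.any_eq_true] at h1 h2
    rcases h1 with ⟨t1, ht1, hc1⟩
    rcases h2 with ⟨t2, ht2, hc2⟩
    constructor
    · intro hnil
      have : PySem.Str.strip (PySem.Str.lower t1) ∈
          PySem.Set.inter
            (PySem.Set.ofList (tokens.map (fun t => PySem.Str.strip (PySem.Str.lower t)))) pvCuesA := by
        rw [PySem.Set.mem_inter, PySem.Set.mem_ofList, List.mem_map]
        refine ⟨⟨t1, ht1, rfl⟩, ?_⟩
        simp only [pvCuesA, PySem.Set.mem_ofList]
        simpa [pvCuesB] using hc1
      rw [hnil] at this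
      exact absurd this (List.not_mem_nil)
    · rw [PySem.Set.contains_iff, PySem.Set.mem_ofList, List.mem_map]
      exact ⟨t2, ht2, by simpa [beq_iff_eq] using hc2⟩

-- ===== VERDICT (by name: the statement is the Claim_ definition above) =====
theorem adjust_framing_for_cues_spec : Claim_equal_adjust_framing_for_cues := by
  intro tokens _
  unfold Spec_adjust_framing_for_cues adjust_framing_for_cues adjust_framing_for_cues_alt
  rw [pvFold_char]
  simp only [Bool.false_or, List.nil_append]
  by_cases h : (tokens.any (fun t => pvCuesB.contains (PySem.Str.strip (PySem.Str.lower t))) = true)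
      ∧ (tokens.any (fun t => PySem.Str.strip (PySem.Str.lower t) == "loose framing") = true)
  · rw [if_pos ((pvCondA_iff tokens).mpr h), if_pos (by rw [h.1, h.2]; rfl)]
  · rw [if_neg (fun hc => h ((pvCondA_iff tokens).mp hc)),
        if_neg (by intro hb; exact h (by simpa [Bool.and_eq_true] using hb))]
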